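-- pv_equiv track=rewrite | github.com/zai-org/SCAIL-Pose | NLFPoseExtract/process_pose_multi.py | get_largest_bbox_indices
-- ===== SOURCE A (Python) =====
-- def get_largest_bbox_indices(bboxes, num_bboxes=2):
--     # 计算每个bbox的面积
--     def calculate_area(bbox):
--         x1, y1, x2, y2 = bbox
--         return (x2 - x1) * (y2 - y1)
--
--     # 计算每个bbox的面积，并保留原索引
--     bboxes_with_area = [(i, calculate_area(bbox)) for i, bbox in enumerate(bboxes)]
--
--     # 根据面积从大到小排序
--     bboxes_with_area.sort(key=lambda x: x[1], reverse=True)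
--
--     # 取出面积最大的 num_bboxes 个索引
--     largest_indices = [idx for idx, _ in bboxes_with_area[:num_bboxes]]
--
--     return largest_indices
-- ===== SOURCE B (Python) =====
-- def get_largest_bbox_indices(bboxes, num_bboxes=2):
--     # repeated argmax selection: only the k requested indices are ever ordered
--     pairs = [(i, (b[2] - b[0]) * (b[3] - b[1])) for i, b in enumerate(bboxes)]
--     out = []
--     for _ in range(max(0, min(len(pairs), num_bboxes))):
--         best = pairs[0]
--         for p in pairs[1:]:
--             if p[1] > best[1]:
--                 best = p
--         out.append(best[0])
--         pairs.remove(best)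
--     return out
-- ===== Notes on version B (the rewrite author's own statement) =====
-- stated objective: alternative
-- what changed: Replaces the full stable descending sort plus slice by a repeated-argmax selection: k clamped passes each scan the remaining (index, area) pairs for the strictly greatest area (strict '>' keeps the earliest index on ties) and remove it, so only the k requested indices are ever ordered.
-- intended difference: For num_bboxes < 0 with len(bboxes)+num_bboxes >= 1, A's slice accidentally returns all but the last |num_bboxes| of the sorted indices, while B returns an empty list, the intended answer when a non-positive number of boxes is requested. — e.g. on get_largest_bbox_indices([(0, 0, 1, 1), (0, 0, 2, 2)], -1): A returns [1], B returns []
import Mathlib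
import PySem

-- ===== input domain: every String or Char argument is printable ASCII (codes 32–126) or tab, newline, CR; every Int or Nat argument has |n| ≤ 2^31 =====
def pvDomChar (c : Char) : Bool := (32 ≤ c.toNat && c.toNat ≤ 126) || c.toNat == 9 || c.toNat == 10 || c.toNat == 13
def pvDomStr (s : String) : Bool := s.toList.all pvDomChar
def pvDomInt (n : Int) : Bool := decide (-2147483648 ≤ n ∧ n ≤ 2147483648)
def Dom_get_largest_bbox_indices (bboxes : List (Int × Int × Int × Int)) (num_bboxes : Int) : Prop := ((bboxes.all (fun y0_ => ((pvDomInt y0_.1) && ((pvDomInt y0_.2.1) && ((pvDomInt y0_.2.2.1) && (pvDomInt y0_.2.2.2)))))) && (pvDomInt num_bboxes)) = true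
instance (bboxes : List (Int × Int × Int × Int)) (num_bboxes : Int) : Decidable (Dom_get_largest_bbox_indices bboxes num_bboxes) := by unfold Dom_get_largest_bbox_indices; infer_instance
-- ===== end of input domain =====

-- B replaces A's full stable descending sort + slice by a repeated-argmax selection
-- (k clamped passes, strict '>' so the earliest index wins area ties); alternative
-- algorithm, same result except for negative num_bboxes (stated as D_ below).

-- ===== PORT A =====
-- def calculate_area(bbox): x1, y1, x2, y2 = bbox; return (x2 - x1) * (y2 - y1)
def pvCalculateArea (bbox : Int × Int × Int × Int) : Int :=
  (bbox.2.2.1 - bbox.1) * (bbox.2.2.2 - bbox.2.1)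

def get_largest_bbox_indices (bboxes : List (Int × Int × Int × Int)) (num_bboxes : Int) : List Int :=
  let bboxes_with_area := (PySem.List.enumerate bboxes 0).map (fun p => (p.1, pvCalculateArea p.2))
  let sortedL := PySem.List.sorted bboxes_with_area (fun x => x.2) true
  (PySem.List.slice sortedL none (some num_bboxes)).map (fun x => x.1)

-- ===== PORT B =====
-- inner scan: best = pairs[0]; for p in pairs[1:]: if p[1] > best[1]: best = p
def pvPickBest (p0 : Int × Int) (rest : List (Int × Int)) : Int × Int :=
  rest.foldl (fun best p => if best.2 < p.2 then p else best) p0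

-- pairs.remove(best): drop the first occurrence; best is always a member here,
-- so Python's ValueError branch is unreachable and the port is exact
def pvRemoveFirst (v : Int × Int) : List (Int × Int) → List (Int × Int)
  | [] => []
  | x :: xs => if x = v then xs else x :: pvRemoveFirst v xs

-- the outer 'for _ in range(k)' loop; k ≤ len(pairs), so the [] case is unreachable
def pvSelLoop : Nat → List (Int × Int) → List Int
  | 0, _ => []
  | _ + 1, [] => []
  | k + 1, p :: ps =>
      let best := pvPickBest p ps
      best.1 :: pvSelLoop k (pvRemoveFirst best (p :: ps))

def get_largest_bbox_indices_alt (bboxes : List (Int × Int × Int × Int)) (num_bboxes : Int) : List Int :=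
  let pairs := (PySem.List.enumerate bboxes 0).map
    (fun p => (p.1, (p.2.2.2.1 - p.2.1) * (p.2.2.2.2 - p.2.2.1)))
  let k : Int := max 0 (min (pairs.length : Int) num_bboxes)
  pvSelLoop k.toNat pairs

-- ===== PRECONDITION & SPEC =====
-- For num_bboxes < 0 with len(bboxes)+num_bboxes ≥ 1, A's slice [:num_bboxes]
-- accidentally returns all but the last |num_bboxes| of the sorted indices, while
-- B returns an empty list, the intended answer for a non-positive request count.
def D_get_largest_bbox_indices (bboxes : List (Int × Int × Int × Int)) (num_bboxes : Int) : Prop :=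
  num_bboxes < 0 ∧ 1 ≤ (bboxes.length : Int) + num_bboxes
instance (bboxes : List (Int × Int × Int × Int)) (num_bboxes : Int) : Decidable (D_get_largest_bbox_indices bboxes num_bboxes) := by unfold D_get_largest_bbox_indices; infer_instance

def Spec_get_largest_bbox_indices (bboxes : List (Int × Int × Int × Int)) (num_bboxes : Int) (out : List Int) : Prop := ¬ D_get_largest_bbox_indices bboxes num_bboxes → out = get_largest_bbox_indices_alt bboxes num_bboxes
instance (bboxes : List (Int × Int × Int × Int)) (num_bboxes : Int) (out : List Int) : Decidable (Spec_get_largest_bbox_indices bboxes num_bboxes out) := by unfold Spec_get_largest_bbox_indices; infer_instance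

def pvDiffWitness_get_largest_bbox_indices : (List (Int × Int × Int × Int)) × Int := ([(0, 0, 1, 1), (0, 0, 2, 2)], -1)
def pvDiffWitnessOut_get_largest_bbox_indices : (List Int) × (List Int) := ([1], [])

-- ===== CLAIM (what is proved, stated in full; the proofs are below) =====
def Claim_unchanged_get_largest_bbox_indices : Prop := ∀ (bboxes : List (Int × Int × Int × Int)) (num_bboxes : Int), Dom_get_largest_bbox_indices bboxes num_bboxes → Spec_get_largest_bbox_indices bboxes num_bboxes (get_largest_bbox_indices bboxes num_bboxes)
def Claim_changed_get_largest_bbox_indices : Prop := Dom_get_largest_bbox_indices (pvDiffWitness_get_largest_bbox_indices.1) (pvDiffWitness_get_largest_bbox_indices.2) ∧ D_get_largest_bbox_indices (pvDiffWitness_get_largest_bbox_indices.1) (pvDiffWitness_get_largest_bbox_indices.2) ∧ get_largest_bbox_indices (pvDiffWitness_get_largest_bbox_indices.1) (pvDiffWitness_get_largest_bbox_indices.2) = pvDiffWitnessOut_get_largest_bbox_indices.1 ∧ get_largest_bbox_indices_alt (pvDiffWitness_get_largest_bbox_indices.1) (pvDiffWitness_get_largest_bbox_indices.2) = pvDiffWitnessOut_get_largest_bbox_indices.2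 ∧ pvDiffWitnessOut_get_largest_bbox_indices.1 ≠ pvDiffWitnessOut_get_largest_bbox_indices.2
def Claim_exact_get_largest_bbox_indices : Prop := ∀ (bboxes : List (Int × Int × Int × Int)) (num_bboxes : Int), Dom_get_largest_bbox_indices bboxes num_bboxes → D_get_largest_bbox_indices bboxes num_bboxes → get_largest_bbox_indices bboxes num_bboxes ≠ get_largest_bbox_indices_alt bboxes num_bboxes

-- ===== LEMMAS AND PROOFS =====

-- combined strict key: area descending, index ascending; injective once indices
-- lie in [0, N)
def pvEnc (N : Int) (p : Int × Int) : Int := -p.2 * N + p.1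

-- the index/bounds invariant every intermediate pair list satisfies
def pvGood (N : Int) (l : List (Int × Int)) : Prop :=
  l.Pairwise (fun a b => a.1 < b.1) ∧ ∀ p ∈ l, 0 ≤ p.1 ∧ p.1 < N

theorem pvEnc_lt_of_area_lt {N : Int} {a b : Int × Int}
    (h0 : 0 ≤ a.1) (hab : a.1 < b.1) (hN : b.1 < N) (h : a.2 < b.2) :
    pvEnc N b < pvEnc N a := by
  unfold pvEnc; nlinarith

theorem pvEnc_lt_of_area_ge {N : Int} {a b : Int × Int}
    (h0 : 0 ≤ a.1) (hab : a.1 < b.1) (hN : b.1 < N) (h : b.2 ≤ a.2) :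
    pvEnc N a < pvEnc N b := by
  unfold pvEnc; nlinarith

theorem pvEnc_inj {N : Int} {a b : Int × Int}
    (ha : 0 ≤ a.1 ∧ a.1 < N) (hb : 0 ≤ b.1 ∧ b.1 < N)
    (h : pvEnc N a = pvEnc N b) : a = b := by
  unfold pvEnc at h
  have h2 : a.1 - b.1 = (a.2 - b.2) * N := by ring_nf; linarith
  have hA : a.2 = b.2 := by
    by_contra hne
    rcases lt_or_gt_of_ne hne with hlt | hgt
    · have : a.2 - b.2 ≤ -1 := by omega
      nlinarith
    · have : 1 ≤ a.2 - b.2 := by omega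
      nlinarith
  have h1 : a.1 = b.1 := by rw [hA] at h2; omega
  exact Prod.ext h1 hA

theorem pvPickBest_mem (p0 : Int × Int) (rest : List (Int × Int)) :
    pvPickBest p0 rest ∈ p0 :: rest := by
  induction rest generalizing p0 with
  | nil => simp [pvPickBest]
  | cons p ps ih =>
    have h := ih (if p0.2 < p.2 then p else p0)
    simp only [pvPickBest, List.foldl_cons] at *
    rcases List.mem_cons.1 h with h | h
    · rw [h]; split_ifs <;> simp
    · simp [h]

theorem pvPickBest_min {N : Int} (p0 : Int × Int) (rest : List (Int × Int))
    (hg : pvGood N (p0 :: rest)) :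
    ∀ y ∈ p0 :: rest, pvEnc N (pvPickBest p0 rest) ≤ pvEnc N y := by
  induction rest generalizing p0 with
  | nil => intro y hy; simp at hy; simp [hy, pvPickBest]
  | cons p ps ih =>
    obtain ⟨hpw, hbd⟩ := hg
    have hp0p : p0.1 < p.1 := (List.pairwise_cons.1 hpw).1 p (by simp)
    have hbp0 := hbd p0 (by simp)
    have hbp := hbd p (by simp)
    have hg' : pvGood N ((if p0.2 < p.2 then p else p0) :: ps) := by
      constructor
      · refine List.pairwise_cons.2 ⟨?_, (List.pairwise_cons.1 (List.pairwise_cons.1 hpw).2).2⟩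
        intro q hq
        have hpq : p.1 < q.1 := (List.pairwise_cons.1 (List.pairwise_cons.1 hpw).2).1 q hq
        split_ifs
        · exact hpq
        · exact lt_trans hp0p hpq
      · intro q hq
        rcases List.mem_cons.1 hq with h | h
        · split_ifs at h <;> simp [h, hbp0, hbp]
        · exact hbd q (by simp [h])
    have key := ih (if p0.2 < p.2 then p else p0) hg'
    have hdrop : pvEnc N (if p0.2 < p.2 then p else p0) < pvEnc N (if p0.2 < p.2 then p0 else p) := by
      split_ifs with h
      · exact pvEnc_lt_of_area_lt hbp0.1 hp0p hbp.2 h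
      · exact pvEnc_lt_of_area_ge hbp0.1 hp0p hbp.2 (by omega)
    intro y hy
    have hres : pvPickBest p0 (p :: ps) = pvPickBest (if p0.2 < p.2 then p else p0) ps := by
      simp [pvPickBest]
    rw [hres]
    rcases List.mem_cons.1 hy with h | h
    · subst h
      by_cases hc : y.2 < p.2
      · calc pvEnc N (pvPickBest (if y.2 < p.2 then p else y) ps)
            ≤ pvEnc N (if y.2 < p.2 then p else y) := key _ (by simp)
          _ ≤ pvEnc N y := le_of_lt (by simpa [hc] using hdrop)
      · exact key y (by simp [hc])
    · rcases List.mem_cons.1 h with h | h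
      · subst h
        by_cases hc : p0.2 < y.2
        · exact key y (by simp [hc])
        · calc pvEnc N (pvPickBest (if p0.2 < y.2 then y else p0) ps)
              ≤ pvEnc N (if p0.2 < y.2 then y else p0) := key _ (by simp)
            _ ≤ pvEnc N y := le_of_lt (by simpa [hc] using hdrop)
      · exact key y (by simp [h])

theorem pvRemoveFirst_eq_erase (v : Int × Int) (l : List (Int × Int)) :
    pvRemoveFirst v l = l.erase v := by
  induction l with
  | nil => simp [pvRemoveFirst]
  | cons x xs ih =>
    rw [pvRemoveFirst, List.erase_cons]
    by_cases h : x = v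
    · simp [h]
    · rw [if_neg h, if_neg (by simpa using h), ih]

theorem pvGood_sublist {N : Int} {l l' : List (Int × Int)}
    (hs : l'.Sublist l) (hg : pvGood N l) : pvGood N l' :=
  ⟨hg.1.sublist hs, fun p hp => hg.2 p (hs.mem hp)⟩

theorem pvGood_nodup {N : Int} {l : List (Int × Int)} (hg : pvGood N l) : l.Nodup := by
  unfold List.Nodup
  refine hg.1.imp ?_
  intro a b h he
  subst he; exact lt_irrefl _ h

-- congruence of insertBy under pointwise agreement of the comparator with x
theorem pvInsertBy_congr {x : Int × Int} {acc : List (Int × Int)}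
    (b1 b2 : (Int × Int) → (Int × Int) → Bool)
    (h : ∀ y ∈ acc, b1 x y = b2 x y) :
    PySem.List.insertBy b1 x acc = PySem.List.insertBy b2 x acc := by
  induction acc with
  | nil => rfl
  | cons y ys ih =>
    have hy := h y (by simp)
    simp only [PySem.List.insertBy, hy]
    by_cases hc : b2 x y
    · simp [hc]
    · simp only [hc, Bool.false_eq_true, if_false]
      have := ih (fun z hz => h z (by simp [hz]))
      rw [this]

-- the two comparators agree on (later, earlier) pairs
theorem pvBefore_agree {N : Int} {x y : Int × Int}
    (h0 : 0 ≤ y.1) (hxy : y.1 < x.1) (hN : x.1 < N) :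
    (decide (y.2 < x.2)) = (decide (pvEnc N x < pvEnc N y)) := by
  rw [decide_eq_decide]
  constructor
  · intro h; unfold pvEnc; nlinarith
  · intro h
    by_contra hc
    have : pvEnc N x < pvEnc N x := lt_trans h (by unfold pvEnc; nlinarith)
    exact lt_irrefl _ this

-- the stable reverse sort by area equals the plain sort by the combined key
theorem pvSorted_rev_eq_sortedE {N : Int} (l : List (Int × Int)) (hg : pvGood N l) :
    PySem.List.sorted l (fun x => x.2) true = PySem.List.sorted l (pvEnc N) false := by
  rw [PySem.List.sorted_rev_eq_foldl_insertBy, PySem.List.sorted_eq_foldl_insertBy]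
  suffices H : ∀ (l2 acc : List (Int × Int)), pvGood N l2 →
      (∀ y ∈ acc, (0 ≤ y.1 ∧ y.1 < N) ∧ ∀ x ∈ l2, y.1 < x.1) →
      List.foldl (fun acc x => PySem.List.insertBy (fun a b => decide (b.2 < a.2)) x acc) acc l2 =
      List.foldl (fun acc x => PySem.List.insertBy (fun a b => decide (pvEnc N a < pvEnc N b)) x acc) acc l2 by
    exact H l [] hg (by simp)
  intro l2
  induction l2 with
  | nil => intro acc _ _; rfl
  | cons x xs ih =>
    intro acc hg2 hacc
    simp only [List.foldl_cons]
    have hx := hg2.2 x (by simp)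
    have heq : PySem.List.insertBy (fun a b => decide (b.2 < a.2)) x acc =
        PySem.List.insertBy (fun a b => decide (pvEnc N a < pvEnc N b)) x acc := by
      refine pvInsertBy_congr _ _ ?_
      intro y hy
      exact pvBefore_agree (hacc y hy).1.1 ((hacc y hy).2 x (by simp)) hx.2
    rw [heq]
    refine ih _ ⟨hg2.1.tail, fun p hp => hg2.2 p (by simp [hp])⟩ ?_
    intro y hy
    rcases (PySem.List.mem_insertBy _ _ _ _).1 hy with h | h
    · subst h
      exact ⟨hx, fun z hz => (List.pairwise_cons.1 hg2.1).1 z hz⟩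
    · exact ⟨(hacc y h).1, fun z hz => (hacc y h).2 z (by simp [hz])⟩

-- selection step: the combined-key sort starts with the argmax pick
theorem pvSortedE_cons {N : Int} (p : Int × Int) (ps : List (Int × Int))
    (hg : pvGood N (p :: ps)) :
    PySem.List.sorted (p :: ps) (pvEnc N) false =
      pvPickBest p ps :: PySem.List.sorted (pvRemoveFirst (pvPickBest p ps) (p :: ps)) (pvEnc N) false := by
  set b := pvPickBest p ps with hb
  set l := p :: ps with hl
  have hmem : b ∈ l := pvPickBest_mem p ps
  have hnd : l.Nodup := pvGood_nodup hg
  rw [pvRemoveFirst_eq_erase]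
  set rest := l.erase b with hrest
  have hrsub : rest.Sublist l := List.erase_sublist ..
  have hsp : (PySem.List.sorted rest (pvEnc N) false).Perm rest := PySem.List.sorted_perm ..
  refine PySem.List.sorted_eq_of_perm_of_pairwise_lt l _ (pvEnc N) ?_ ?_
  · exact (List.Perm.cons b hsp).trans (List.perm_cons_erase hmem).symm
  · refine List.pairwise_cons.2 ⟨?_, ?_⟩
    · intro y hy
      have hyR : y ∈ rest := (PySem.List.mem_sorted ..).1 hy
      have hyl : y ≠ b ∧ y ∈ l := (hnd.mem_erase_iff).1 hyR
      have hle : pvEnc N b ≤ pvEnc N y := pvPickBest_min p ps hg y hyl.2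
      rcases lt_or_eq_of_le hle with h | h
      · exact h
      · exact absurd (pvEnc_inj (hg.2 b hmem) (hg.2 y hyl.2) h) (fun he => hyl.1 he.symm)
    · have hle : (PySem.List.sorted rest (pvEnc N) false).Pairwise (fun a c => pvEnc N a ≤ pvEnc N c) :=
        PySem.List.sorted_pairwise ..
      have hndr : (PySem.List.sorted rest (pvEnc N) false).Nodup := hsp.nodup_iff.2 (hnd.erase b)
      refine (hle.and hndr).imp_of_mem ?_
      intro a c ha hc h
      have haL : a ∈ l := hrsub.mem ((PySem.List.mem_sorted ..).1 ha)
      have hcL : c ∈ l := hrsub.mem ((PySem.List.mem_sorted ..).1 hc)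
      rcases lt_or_eq_of_le h.1 with h1 | h1
      · exact h1
      · exact absurd (pvEnc_inj (hg.2 a haL) (hg.2 c hcL) h1) h.2

-- B's outer loop produces the first k indices of the combined-key sort
theorem pvSelLoop_eq_take {N : Int} (k : Nat) (l : List (Int × Int)) (hg : pvGood N l) :
    pvSelLoop k l = ((PySem.List.sorted l (pvEnc N) false).take k).map (fun x => x.1) := by
  induction k generalizing l with
  | zero => simp [pvSelLoop]
  | succ k ih =>
    cases l with
    | nil =>
      have : PySem.List.sorted ([] : List (Int × Int)) (pvEnc N) false = [] := rfl
      simp [pvSelLoop, this]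
    | cons p ps =>
      rw [pvSelLoop, pvSortedE_cons p ps hg]
      simp only [List.take_succ_cons, List.map_cons]
      congr 1
      refine ih _ (pvGood_sublist ?_ hg)
      rw [pvRemoveFirst_eq_erase]
      exact List.erase_sublist ..

theorem pvClamp (n : Nat) (num : Int) (h : ¬ (num < 0 ∧ 1 ≤ (n : Int) + num)) :
    (max 0 (min (n : Int) num)).toNat = PySem.List.clampIdx n num := by
  unfold PySem.List.clampIdx
  split_ifs <;> omega

theorem pvClamp_pos (n : Nat) (num : Int) (h1 : num < 0) (h2 : 1 ≤ (n : Int) + num) :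
    1 ≤ PySem.List.clampIdx n num := by
  unfold PySem.List.clampIdx
  split_ifs <;> omega

theorem pvSliceTake {α : Type} (xs : List α) (b : Int) :
    PySem.List.slice xs none (some b) = xs.take (PySem.List.clampIdx xs.length b) := by
  simp [PySem.List.slice]

-- the invariant pvGood holds for A's/B's common enumerated pair list
theorem pvGood_pairs (bboxes : List (Int × Int × Int × Int))
    (f : (Int × Int × Int × Int) → Int) :
    pvGood (((PySem.List.enumerate bboxes 0).map (fun p => (p.1, f p.2))).length : Int)
      ((PySem.List.enumerate bboxes 0).map (fun p => (p.1, f p.2))) := by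
  constructor
  · exact List.pairwise_map.2 ((PySem.List.pairwise_lt_enumerate bboxes 0).imp (fun h => h))
  · intro q hq
    rcases List.mem_map.1 hq with ⟨p, hp, rfl⟩
    rcases (PySem.List.mem_enumerate_iff ..).1 hp with ⟨j, hj, rfl⟩
    have hlen : ((PySem.List.enumerate bboxes 0).map (fun p => (p.1, f p.2))).length = bboxes.length := by
      simp [PySem.List.length_enumerate]
    constructor
    · simp
    · simp only [hlen]
      omega

-- ===== VERDICT (by name: the statement is the Claim_ definition above) =====
theorem get_largest_bbox_indices_spec : Claim_unchanged_get_largest_bbox_indices := by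
  intro bboxes num_bboxes _
  unfold Spec_get_largest_bbox_indices
  intro hD
  unfold get_largest_bbox_indices get_largest_bbox_indices_alt
  simp only [pvCalculateArea]
  set ba := (PySem.List.enumerate bboxes 0).map
    (fun p => (p.1, (p.2.2.2.1 - p.2.1) * (p.2.2.2.2 - p.2.2.1))) with hba
  have hg : pvGood (ba.length : Int) ba := pvGood_pairs bboxes (fun x => (x.2.2.1 - x.1) * (x.2.2.2 - x.2.1))
  have hlen2 : (PySem.List.sorted ba (fun x => x.2) true).length = ba.length :=
    PySem.List.length_sorted ..
  have hnD : ¬ (num_bboxes < 0 ∧ 1 ≤ (ba.length : Int) + num_bboxes) := by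
    have hlen : ba.length = bboxes.length := by
      simp [hba, PySem.List.length_enumerate]
    unfold D_get_largest_bbox_indices at hD
    rw [hlen]
    exact hD
  rw [pvSliceTake, hlen2, ← pvClamp ba.length num_bboxes hnD,
      pvSorted_rev_eq_sortedE ba hg, pvSelLoop_eq_take _ ba hg]

theorem get_largest_bbox_indices_changed : Claim_changed_get_largest_bbox_indices := by
  unfold Claim_changed_get_largest_bbox_indices; decide

theorem get_largest_bbox_indices_tight : Claim_exact_get_largest_bbox_indices := by
  intro bboxes num_bboxes _ hD
  obtain ⟨h1, h2⟩ := hD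
  unfold get_largest_bbox_indices get_largest_bbox_indices_alt
  simp only [pvCalculateArea]
  set ba := (PySem.List.enumerate bboxes 0).map
    (fun p => (p.1, (p.2.2.2.1 - p.2.1) * (p.2.2.2.2 - p.2.2.1))) with hba
  have hlen : ba.length = bboxes.length := by
    simp [hba, PySem.List.length_enumerate]
  have hlen2 : (PySem.List.sorted ba (fun x => x.2) true).length = ba.length :=
    PySem.List.length_sorted ..
  -- B's clamped count is 0, so B returns []
  have hk : (max 0 (min (ba.length : Int) num_bboxes)).toNat = 0 := by omega
  rw [hk]
  -- A's slice keeps at least one element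
  have hApos : 1 ≤ PySem.List.clampIdx ba.length num_bboxes :=
    pvClamp_pos _ _ h1 (by omega)
  intro hcontra
  have hAlen : ((PySem.List.slice (PySem.List.sorted ba (fun x => x.2) true) none (some num_bboxes)).map (fun x => x.1)).length = 0 := by
    rw [hcontra]; rfl
  rw [List.length_map, pvSliceTake, List.length_take, hlen2] at hAlen
  omega
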